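-- pv_equiv track=rewrite | github.com/Rexjaden/guardianshield-agents | blockchain_mastery_orchestrator.py | _calculate_topic_complexity
-- ===== SOURCE A (Python) =====
-- def _calculate_topic_complexity(topic: str) -> int:
--     """Calculate complexity level based on topic content"""
--     complexity_keywords = {
--         'implementation': 3, 'architecture': 3, 'mechanisms': 3,
--         'optimization': 4, 'security': 4, 'advanced': 4,
--         'mathematical': 5, 'cryptographic': 5, 'protocol': 3,
--         'analysis': 3, 'strategies': 2, 'fundamentals': 2,
--         'integration': 3, 'management': 2, 'economics': 4
--     }
--
--     topic_lower = topic.lower()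
--     complexity = 1
--
--     for keyword, weight in complexity_keywords.items():
--         if keyword in topic_lower:
--             complexity = max(complexity, weight)
--
--     return min(complexity, 5)  # Cap at level 5
-- ===== SOURCE B (Python) =====
-- def _calculate_topic_complexity(topic: str) -> int:
--     tiers = [
--         (5, ('mathematical', 'cryptographic')),
--         (4, ('optimization', 'security', 'advanced', 'economics')),
--         (3, ('implementation', 'architecture', 'mechanisms', 'protocol', 'analysis', 'integration')),
--         (2, ('strategies', 'fundamentals', 'management')),
--     ]
--     topic_lower = topic.lower()
--     for weight, keywords in tiers:
--         if any(k in topic_lower for k in keywords):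
--             return weight
--     return 1
-- ===== Notes on version B (the rewrite author's own statement) =====
-- stated objective: alternative
-- what changed: Replaces the scan-all-keywords-and-accumulate-max loop (plus a final min cap) with a priority-ordered tier table (5,4,3,2) that returns the first tier whose keyword group matches, short-circuiting.
import Mathlib
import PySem

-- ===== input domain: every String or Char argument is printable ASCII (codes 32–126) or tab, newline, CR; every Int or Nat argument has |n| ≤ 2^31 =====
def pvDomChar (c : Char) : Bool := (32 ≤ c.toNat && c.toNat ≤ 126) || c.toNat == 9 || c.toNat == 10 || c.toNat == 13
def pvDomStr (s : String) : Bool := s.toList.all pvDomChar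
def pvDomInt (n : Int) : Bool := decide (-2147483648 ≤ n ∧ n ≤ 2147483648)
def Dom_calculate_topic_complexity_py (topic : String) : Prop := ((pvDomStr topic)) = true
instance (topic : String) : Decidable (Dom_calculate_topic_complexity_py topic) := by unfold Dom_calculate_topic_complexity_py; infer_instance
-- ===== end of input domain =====

-- B replaces A's accumulate-the-max scan over all 15 keywords with a priority-ordered
-- tier table returning the first matching tier (alternative decomposition, same cost).

-- ===== PORT A =====
-- the complexity_keywords dict, in insertion order
def pvKeywords : List (String × Int) :=
  [("implementation", 3), ("architecture", 3), ("mechanisms", 3),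
   ("optimization", 4), ("security", 4), ("advanced", 4),
   ("mathematical", 5), ("cryptographic", 5), ("protocol", 3),
   ("analysis", 3), ("strategies", 2), ("fundamentals", 2),
   ("integration", 3), ("management", 2), ("economics", 4)]

-- the loop body: if keyword in topic_lower: complexity = max(complexity, weight)
def pvStep (topic_lower : String) (complexity : Int) (kw : String × Int) : Int :=
  if PySem.Str.isIn kw.1 topic_lower then max complexity kw.2 else complexity

def calculate_topic_complexity_py (topic : String) : Int :=
  let topic_lower := PySem.Str.lower topic
  let complexity := pvKeywords.foldl (pvStep topic_lower) 1
  min complexity 5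

-- ===== PORT B =====
def pvTiers : List (Int × List String) :=
  [(5, ["mathematical", "cryptographic"]),
   (4, ["optimization", "security", "advanced", "economics"]),
   (3, ["implementation", "architecture", "mechanisms", "protocol", "analysis", "integration"]),
   (2, ["strategies", "fundamentals", "management"])]

-- the for-loop with early return: first tier having a matching keyword wins
def pvFindTier (topic_lower : String) : List (Int × List String) → Int
  | [] => 1
  | (weight, kws) :: rest =>
      if kws.any (fun k => PySem.Str.isIn k topic_lower) then weight
      else pvFindTier topic_lower rest

def calculate_topic_complexity_py_alt (topic : String) : Int :=
  pvFindTier (PySem.Str.lower topic) pvTiers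

-- ===== PRECONDITION & SPEC =====
def Spec_calculate_topic_complexity_py (topic : String) (out : Int) : Prop := out = calculate_topic_complexity_py_alt topic
instance (topic : String) (out : Int) : Decidable (Spec_calculate_topic_complexity_py topic out) := by unfold Spec_calculate_topic_complexity_py; infer_instance

-- ===== CLAIM (what is proved, stated in full; the proofs are below) =====
def Claim_equal_calculate_topic_complexity_py : Prop := ∀ (topic : String), Dom_calculate_topic_complexity_py topic → Spec_calculate_topic_complexity_py topic (calculate_topic_complexity_py topic)

-- ===== LEMMAS AND PROOFS =====

-- the base is a lower bound of the max-accumulating fold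
theorem pvFold_le (tl : String) (l : List (String × Int)) (a : Int) :
    a ≤ l.foldl (pvStep tl) a := by
  induction l generalizing a with
  | nil => simp
  | cons x t ih =>
    simp only [List.foldl, pvStep]
    split
    · exact le_trans (le_max_left _ _) (ih _)
    · exact ih a

-- every matched keyword's weight bounds the fold from below
theorem pvFold_mem_le (tl : String) (l : List (String × Int)) (a : Int) {k : String} {w : Int}
    (h : (k, w) ∈ l) (hp : PySem.Str.isIn k tl = true) :
    w ≤ l.foldl (pvStep tl) a := by
  induction l generalizing a with
  | nil => cases h
  | cons x t ih =>
    simp only [List.foldl]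
    rcases List.mem_cons.mp h with rfl | h'
    · simp only [pvStep, hp, if_pos]
      exact le_trans (le_max_right _ _) (pvFold_le tl t _)
    · exact ih _ h'

-- the fold result is the base or the weight of some matched keyword
theorem pvFold_cases (tl : String) (l : List (String × Int)) (a : Int) :
    l.foldl (pvStep tl) a = a ∨
      ∃ kw ∈ l, PySem.Str.isIn kw.1 tl = true ∧ l.foldl (pvStep tl) a = kw.2 := by
  induction l generalizing a with
  | nil => exact Or.inl rfl
  | cons x t ih =>
    simp only [List.foldl, pvStep]
    by_cases hx : PySem.Str.isIn x.1 tl = true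
    · rw [if_pos hx]
      rcases ih (max a x.2) with h | ⟨kw, hm, hp, he⟩
      · by_cases hle : x.2 ≤ a
        · exact Or.inl (h.trans (max_eq_left hle))
        · exact Or.inr ⟨x, List.mem_cons_self, hx, h.trans (max_eq_right (by omega))⟩
      · exact Or.inr ⟨kw, List.mem_cons_of_mem _ hm, hp, he⟩
    · rw [if_neg hx]
      rcases ih a with h | ⟨kw, hm, hp, he⟩
      · exact Or.inl h
      · exact Or.inr ⟨kw, List.mem_cons_of_mem _ hm, hp, he⟩

theorem pvMain (tl : String) :
    min (pvKeywords.foldl (pvStep tl) 1) 5 = pvFindTier tl pvTiers := by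
  have h1 : (1 : Int) ≤ pvKeywords.foldl (pvStep tl) 1 := pvFold_le tl pvKeywords 1
  have hcase := pvFold_cases tl pvKeywords 1
  by_cases hma : PySem.Str.isIn "mathematical" tl = true
  · have h5 := pvFold_mem_le tl pvKeywords 1 (k := "mathematical") (w := 5) (by simp [pvKeywords]) hma
    simp only [pvTiers, pvFindTier, List.any_cons, List.any_nil, hma, Bool.true_or, Bool.or_true, Bool.false_or, Bool.or_false, Bool.false_eq_true, reduceIte]
    omega
  · rw [Bool.not_eq_true] at hma
    by_cases hcr : PySem.Str.isIn "cryptographic" tl = true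
    · have h5 := pvFold_mem_le tl pvKeywords 1 (k := "cryptographic") (w := 5) (by simp [pvKeywords]) hcr
      simp only [pvTiers, pvFindTier, List.any_cons, List.any_nil, hma, hcr, Bool.true_or, Bool.or_true, Bool.false_or, Bool.or_false, Bool.false_eq_true, reduceIte]
      omega
    · rw [Bool.not_eq_true] at hcr
      have hub4 : pvKeywords.foldl (pvStep tl) 1 ≤ 4 := by
        rcases hcase with h | ⟨kw, hm, hp, he⟩
        · omega
        · simp only [pvKeywords, List.mem_cons, List.not_mem_nil, or_false] at hm
          rcases hm with rfl|rfl|rfl|rfl|rfl|rfl|rfl|rfl|rfl|rfl|rfl|rfl|rfl|rfl|rfl <;>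
            simp_all
      by_cases h4 : (PySem.Str.isIn "optimization" tl || PySem.Str.isIn "security" tl ||
          PySem.Str.isIn "advanced" tl || PySem.Str.isIn "economics" tl) = true
      · simp only [Bool.or_eq_true] at h4
        have h4le : (4 : Int) ≤ pvKeywords.foldl (pvStep tl) 1 := by
          rcases h4 with ((h|h)|h)|h <;>
            exact pvFold_mem_le tl pvKeywords 1 (by simp [pvKeywords]) h
        rcases h4 with ((h|h)|h)|h <;>
          simp only [pvTiers, pvFindTier, List.any_cons, List.any_nil, hma, hcr, h, Bool.true_or, Bool.or_true, Bool.false_or, Bool.or_false, Bool.false_eq_true, reduceIte] <;>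
          omega
      · simp only [Bool.or_eq_true, not_or, Bool.not_eq_true] at h4
        obtain ⟨⟨⟨hop, hse⟩, had⟩, hec⟩ := h4
        have hub3 : pvKeywords.foldl (pvStep tl) 1 ≤ 3 := by
          rcases hcase with h | ⟨kw, hm, hp, he⟩
          · omega
          · simp only [pvKeywords, List.mem_cons, List.not_mem_nil, or_false] at hm
            rcases hm with rfl|rfl|rfl|rfl|rfl|rfl|rfl|rfl|rfl|rfl|rfl|rfl|rfl|rfl|rfl <;>
              simp_all
        by_cases h3 : (PySem.Str.isIn "implementation" tl || PySem.Str.isIn "architecture" tl ||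
            PySem.Str.isIn "mechanisms" tl || PySem.Str.isIn "protocol" tl ||
            PySem.Str.isIn "analysis" tl || PySem.Str.isIn "integration" tl) = true
        · simp only [Bool.or_eq_true] at h3
          have h3le : (3 : Int) ≤ pvKeywords.foldl (pvStep tl) 1 := by
            rcases h3 with ((((h|h)|h)|h)|h)|h <;>
              exact pvFold_mem_le tl pvKeywords 1 (by simp [pvKeywords]) h
          rcases h3 with ((((h|h)|h)|h)|h)|h <;>
            simp only [pvTiers, pvFindTier, List.any_cons, List.any_nil, hma, hcr, hop, hse, had, hec, h, Bool.true_or, Bool.or_true, Bool.false_or, Bool.or_false, Bool.false_eq_true, reduceIte] <;>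
            omega
        · simp only [Bool.or_eq_true, not_or, Bool.not_eq_true] at h3
          obtain ⟨⟨⟨⟨⟨him, har⟩, hme⟩, hpr⟩, han⟩, hin⟩ := h3
          have hub2 : pvKeywords.foldl (pvStep tl) 1 ≤ 2 := by
            rcases hcase with h | ⟨kw, hm, hp, he⟩
            · omega
            · simp only [pvKeywords, List.mem_cons, List.not_mem_nil, or_false] at hm
              rcases hm with rfl|rfl|rfl|rfl|rfl|rfl|rfl|rfl|rfl|rfl|rfl|rfl|rfl|rfl|rfl <;>
                simp_all
          by_cases h2 : (PySem.Str.isIn "strategies" tl || PySem.Str.isIn "fundamentals" tl ||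
              PySem.Str.isIn "management" tl) = true
          · simp only [Bool.or_eq_true] at h2
            have h2le : (2 : Int) ≤ pvKeywords.foldl (pvStep tl) 1 := by
              rcases h2 with (h|h)|h <;>
                exact pvFold_mem_le tl pvKeywords 1 (by simp [pvKeywords]) h
            rcases h2 with (h|h)|h <;>
              simp only [pvTiers, pvFindTier, List.any_cons, List.any_nil, hma, hcr, hop, hse, had, hec, him, har, hme, hpr, han, hin, h, Bool.true_or, Bool.or_true, Bool.false_or, Bool.or_false, Bool.false_eq_true, reduceIte] <;>
              omega
          · simp only [Bool.or_eq_true, not_or, Bool.not_eq_true] at h2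
            obtain ⟨⟨hst, hfu⟩, hmg⟩ := h2
            have hub1 : pvKeywords.foldl (pvStep tl) 1 ≤ 1 := by
              rcases hcase with h | ⟨kw, hm, hp, he⟩
              · omega
              · simp only [pvKeywords, List.mem_cons, List.not_mem_nil, or_false] at hm
                rcases hm with rfl|rfl|rfl|rfl|rfl|rfl|rfl|rfl|rfl|rfl|rfl|rfl|rfl|rfl|rfl <;>
                  simp_all
            simp only [pvTiers, pvFindTier, List.any_cons, List.any_nil, hma, hcr, hop, hse, had, hec, him, har, hme, hpr, han, hin, hst, hfu, hmg, Bool.true_or, Bool.or_true, Bool.false_or, Bool.or_false, Bool.false_eq_true, reduceIte]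
            omega

-- ===== VERDICT (by name: the statement is the Claim_ definition above) =====
theorem calculate_topic_complexity_py_spec : Claim_equal_calculate_topic_complexity_py := by
  intro topic _
  unfold Spec_calculate_topic_complexity_py calculate_topic_complexity_py calculate_topic_complexity_py_alt
  exact pvMain (PySem.Str.lower topic)
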